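-- pv_equiv track=rewrite | github.com/justanotherdot/advent-linguist | python/advent11.py | contains_overlapping_sets
-- ===== SOURCE A (Python) =====
-- def contains_overlapping_sets(s):
--     used_chars = []
--     for i,c in enumerate(s):
--         if i+1 < len(s):
--             if (s[i+1] not in used_chars and c == s[i+1]):
--                 used_chars.append(c)
--     if len(used_chars) > 1:
--         return True
--     else:
--         return False
-- ===== SOURCE B (Python) =====
-- def contains_overlapping_sets(s):
--     # Run-segmentation: collect the set of characters that head a run of length >= 2.
--     doubled = set()
--     i = 0
--     n = len(s)
--     while i < n:
--         j = i + 1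
--         while j < n and s[j] == s[i]:
--             j += 1
--         if j - i >= 2:
--             doubled.add(s[i])
--         i = j
--     return len(doubled) > 1
-- ===== Notes on version B (the rewrite author's own statement) =====
-- stated objective: alternative
-- what changed: Replaces the index-by-index adjacent-pair scan with a linear membership list by a run-segmentation pass that jumps over each maximal run of equal characters and records run-heads of length >= 2 in a set.
import Mathlib
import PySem

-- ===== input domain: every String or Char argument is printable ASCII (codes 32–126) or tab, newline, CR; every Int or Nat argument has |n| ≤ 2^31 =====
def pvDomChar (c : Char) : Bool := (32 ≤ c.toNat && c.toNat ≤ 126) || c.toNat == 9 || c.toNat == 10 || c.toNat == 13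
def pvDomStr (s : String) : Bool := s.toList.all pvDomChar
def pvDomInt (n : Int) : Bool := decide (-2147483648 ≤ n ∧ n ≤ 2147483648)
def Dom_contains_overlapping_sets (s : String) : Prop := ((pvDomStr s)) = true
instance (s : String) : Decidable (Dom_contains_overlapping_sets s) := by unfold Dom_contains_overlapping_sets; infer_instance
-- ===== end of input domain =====

-- B replaces A's index-wise adjacent-pair scan (with a linear membership list) by a
-- run-segmentation pass collecting run-heads of length ≥ 2 in a set (alternative algorithm).

-- ===== PORT A =====
def contains_overlapping_sets (s : String) : Bool :=
  let cs := s.toList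
  let used := (PySem.List.enumerate cs 0).foldl (fun used ic =>
    if ic.1 + 1 < PySem.List.len cs then
      match PySem.List.pyGet? cs (ic.1 + 1) with
      | some nxt => if !(used.contains nxt) && (ic.2 == nxt) then used ++ [ic.2] else used
      | none => used
    else used) ([] : List Char)
  decide (used.length > 1)

-- ===== PORT B =====
-- helper for B: the outer while loop; each step consumes one maximal run (inner while = takeWhile/dropWhile)
def pvRuns : List Char → PySem.Set Char → PySem.Set Char
  | [], acc => acc
  | c :: rest, acc =>
    let acc' := if 1 + (rest.takeWhile (· == c)).length ≥ 2 then PySem.Set.add acc c else acc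
    pvRuns (rest.dropWhile (· == c)) acc'
termination_by l _ => l.length
decreasing_by
  have := List.length_dropWhile_le (· == c) rest
  simp only [List.length_cons]
  omega

def contains_overlapping_sets_alt (s : String) : Bool :=
  decide (PySem.Set.len (pvRuns s.toList PySem.Set.empty) > 1)

-- ===== PRECONDITION & SPEC =====
def Spec_contains_overlapping_sets (s : String) (out : Bool) : Prop := out = contains_overlapping_sets_alt s
instance (s : String) (out : Bool) : Decidable (Spec_contains_overlapping_sets s out) := by unfold Spec_contains_overlapping_sets; infer_instance

-- ===== CLAIM (what is proved, stated in full; the proofs are below) =====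
def Claim_equal_contains_overlapping_sets : Prop := ∀ (s : String), Dom_contains_overlapping_sets s → Spec_contains_overlapping_sets s (contains_overlapping_sets s)

-- ===== LEMMAS AND PROOFS =====

-- structural form of A's loop: scan adjacent pairs
def pvScanA : List Char → List Char → List Char
  | a :: b :: t, used => pvScanA (b :: t) (if !(used.contains b) && (a == b) then used ++ [a] else used)
  | _, used => used

-- "x heads some adjacent equal pair of l"
def pvHasAdj : List Char → Char → Bool
  | a :: b :: t, x => (a == b && b == x) || pvHasAdj (b :: t) x
  | _, _ => false

-- A's fold over enumerate, started at offset pre.length into cs = pre ++ suf, is the structural pair scan of suf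
lemma pvFoldA (suf : List Char) : ∀ (pre used : List Char),
    (PySem.List.enumerate suf (pre.length : Int)).foldl (fun used ic =>
      if ic.1 + 1 < PySem.List.len (pre ++ suf) then
        match PySem.List.pyGet? (pre ++ suf) (ic.1 + 1) with
        | some nxt => if !(used.contains nxt) && (ic.2 == nxt) then used ++ [ic.2] else used
        | none => used
      else used) used = pvScanA suf used := by
  induction suf with
  | nil => intro pre used; simp [PySem.List.enumerate, pvScanA]
  | cons a rest ih =>
    intro pre used
    rw [PySem.List.enumerate_cons, List.foldl_cons]
    have hcs : pre ++ a :: rest = (pre ++ [a]) ++ rest := by simp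
    cases rest with
    | nil =>
      have hguard : ¬ ((pre.length : Int) + 1 < PySem.List.len (pre ++ [a])) := by
        simp only [PySem.List.len_eq, List.length_append, List.length_cons, List.length_nil]
        push_cast; omega
      simp only [PySem.List.enumerate_nil, List.foldl_nil]
      rw [if_neg hguard]
      simp [pvScanA]
    | cons b t =>
      have hguard : (pre.length : Int) + 1 < PySem.List.len (pre ++ a :: b :: t) := by
        simp only [PySem.List.len_eq, List.length_append, List.length_cons]
        push_cast; omega
      have hget : PySem.List.pyGet? (pre ++ a :: b :: t) ((pre.length : Int) + 1) = some b := by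
        have : ((pre.length : Int) + 1) = ((pre.length + 1 : Nat) : Int) := by push_cast; ring
        rw [this, PySem.List.pyGet?_natCast]
        rw [List.getElem?_append_right (by omega)]
        simp
      simp only [hguard, if_pos, hget]
      have hlen : (pre.length : Int) + 1 = (((pre ++ [a]).length : Nat) : Int) := by
        simp
      rw [hlen]
      have := ih (pre ++ [a]) (if !(used.contains b) && (a == b) then used ++ [a] else used)
      rw [hcs]
      simpa [pvScanA] using this

lemma pvA_eq (s : String) :
    contains_overlapping_sets s = decide ((pvScanA s.toList []).length > 1) := by
  have := pvFoldA s.toList [] []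
  simp only [List.length_nil, Nat.cast_zero, List.nil_append] at this
  simp only [contains_overlapping_sets]
  rw [this]

lemma pvScanA_mem (l : List Char) : ∀ (used : List Char) (x : Char),
    x ∈ pvScanA l used ↔ x ∈ used ∨ pvHasAdj l x = true := by
  induction l with
  | nil => intro used x; simp [pvScanA, pvHasAdj]
  | cons a rest ih =>
    intro used x
    cases rest with
    | nil => simp [pvScanA, pvHasAdj]
    | cons b t =>
      simp only [pvScanA]
      rw [ih]
      simp only [pvHasAdj, Bool.or_eq_true, Bool.and_eq_true, beq_iff_eq]
      by_cases hab : a = b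
      · subst hab
        by_cases hmem : a ∈ used
        · rw [if_neg (by simp [hmem])]
          constructor
          · rintro (h | h)
            · exact Or.inl h
            · tauto
          · rintro (h | h)
            · exact Or.inl h
            · rcases (by tauto : a = x ∨ pvHasAdj (a :: t) x = true) with hx | h2
              · exact Or.inl (hx ▸ hmem)
              · exact Or.inr h2
        · rw [if_pos (by simp [hmem])]
          simp only [List.mem_append, List.mem_singleton]
          constructor
          · rintro ((h | h) | h) <;> tauto
          · rintro (h | h)
            · exact Or.inl (Or.inl h)
            · rcases (by tauto : a = x ∨ pvHasAdj (a :: t) x = true) with hx | h2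
              · exact Or.inl (Or.inr hx.symm)
              · exact Or.inr h2
      · rw [if_neg (by simp [hab])]
        constructor
        · rintro (h | h) <;> tauto
        · rintro (h | h)
          · exact Or.inl h
          · rcases (by tauto : (a = b ∧ b = x) ∨ pvHasAdj (b :: t) x = true) with ⟨he, _⟩ | h2
            · exact absurd he hab
            · exact Or.inr h2

lemma pvScanA_nodup (l : List Char) : ∀ (used : List Char), used.Nodup → (pvScanA l used).Nodup := by
  induction l with
  | nil => intro used h; exact h
  | cons a rest ih =>
    intro used h
    cases rest with
    | nil => exact h
    | cons b t =>
      simp only [pvScanA]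
      apply ih
      by_cases hc : (!(used.contains b) && (a == b)) = true
      · rw [if_pos hc]
        have hc' : b ∉ used ∧ a = b := by simpa using hc
        rcases hc' with ⟨hnb, hab⟩
        subst hab
        have : (used ++ [a]).Nodup := by
          simp [List.nodup_append, h]
          exact fun y hy he => hnb (he ▸ hy)
        exact this
      · rw [if_neg hc]; exact h

lemma pvHasAdj_cons (c : Char) (l : List Char) (x : Char) :
    pvHasAdj (c :: l) x = true ↔
      (x = c ∧ l.takeWhile (· == c) ≠ []) ∨ pvHasAdj (l.dropWhile (· == c)) x = true := by
  induction l with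
  | nil => simp [pvHasAdj]
  | cons d t ih =>
    simp only [pvHasAdj, Bool.or_eq_true, Bool.and_eq_true, beq_iff_eq]
    by_cases hdc : d = c
    · subst hdc
      have htw : (d :: t).takeWhile (· == d) ≠ [] := by simp
      have hdw : (d :: t).dropWhile (· == d) = t.dropWhile (· == d) := by simp
      rw [hdw]
      constructor
      · rintro (h | h)
        · exact Or.inl ⟨(by tauto : d = x).symm, htw⟩
        · rcases ih.mp h with ⟨hx, _⟩ | h2
          · exact Or.inl ⟨hx, htw⟩
          · exact Or.inr h2
      · rintro (⟨hx, _⟩ | h2)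
        · exact Or.inl ⟨rfl, hx.symm⟩
        · exact Or.inr (ih.mpr (Or.inr h2))
    · have htw : (d :: t).takeWhile (· == c) = [] := by simp [hdc]
      have hdw : (d :: t).dropWhile (· == c) = d :: t := by simp [hdc]
      rw [htw, hdw]
      constructor
      · rintro (⟨hcd, _⟩ | h)
        · exact absurd hcd.symm hdc
        · exact Or.inr h
      · rintro (⟨_, hne⟩ | h)
        · exact absurd rfl hne
        · exact Or.inr h

lemma pvRuns_mem_aux (n : Nat) : ∀ (l : List Char), l.length ≤ n → ∀ (acc : PySem.Set Char) (x : Char),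
    x ∈ pvRuns l acc ↔ x ∈ acc ∨ pvHasAdj l x = true := by
  induction n with
  | zero =>
    intro l hl acc x
    have hnil : l = [] := List.eq_nil_of_length_eq_zero (Nat.le_zero.mp hl)
    subst hnil
    simp [pvRuns, pvHasAdj]
  | succ n ih =>
    intro l hl acc x
    cases l with
    | nil => simp [pvRuns, pvHasAdj]
    | cons c rest =>
      rw [pvRuns]
      rw [ih (rest.dropWhile (· == c))
        (by have := List.length_dropWhile_le (· == c) rest
            simp only [List.length_cons] at hl; omega)]
      rw [pvHasAdj_cons]
      by_cases hrun : rest.takeWhile (· == c) = []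
      · have hlen : ¬ (1 + (rest.takeWhile (· == c)).length ≥ 2) := by simp [hrun]
        rw [if_neg hlen]
        simp [hrun]
      · have hlen : 1 + (rest.takeWhile (· == c)).length ≥ 2 := by
          cases h : rest.takeWhile (· == c) with
          | nil => exact absurd h hrun
          | cons _ _ => simp only [List.length_cons]; omega
        rw [if_pos hlen]
        rw [PySem.Set.mem_add]
        constructor
        · rintro ((h | h) | h2)
          · exact Or.inl h
          · exact Or.inr (Or.inl ⟨h, hrun⟩)
          · exact Or.inr (Or.inr h2)
        · rintro (h | (⟨hx, _⟩ | h2))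
          · exact Or.inl (Or.inl h)
          · exact Or.inl (Or.inr hx)
          · exact Or.inr h2

lemma pvRuns_mem (l : List Char) (acc : PySem.Set Char) (x : Char) :
    x ∈ pvRuns l acc ↔ x ∈ acc ∨ pvHasAdj l x = true :=
  pvRuns_mem_aux l.length l (le_refl _) acc x

lemma pvRuns_nodup_aux (n : Nat) : ∀ (l : List Char), l.length ≤ n → ∀ (acc : PySem.Set Char),
    acc.Nodup → (pvRuns l acc).Nodup := by
  induction n with
  | zero =>
    intro l hl acc h
    have hnil : l = [] := List.eq_nil_of_length_eq_zero (Nat.le_zero.mp hl)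
    subst hnil
    simpa [pvRuns] using h
  | succ n ih =>
    intro l hl acc h
    cases l with
    | nil => simpa [pvRuns] using h
    | cons c rest =>
      rw [pvRuns]
      apply ih (rest.dropWhile (· == c))
        (by have := List.length_dropWhile_le (· == c) rest
            simp only [List.length_cons] at hl; omega)
      split
      · exact PySem.Set.nodup_add acc c h
      · exact h

lemma pvRuns_nodup (l : List Char) (acc : PySem.Set Char) (h : acc.Nodup) : (pvRuns l acc).Nodup :=
  pvRuns_nodup_aux l.length l (le_refl _) acc h

-- ===== VERDICT (by name: the statement is the Claim_ definition above) =====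
theorem contains_overlapping_sets_spec : Claim_equal_contains_overlapping_sets := by
  intro s _
  show contains_overlapping_sets s = contains_overlapping_sets_alt s
  rw [pvA_eq]
  simp only [contains_overlapping_sets_alt, PySem.Set.len]
  have hperm : (pvScanA s.toList []).length = (pvRuns s.toList PySem.Set.empty).length := by
    have h1 : (pvScanA s.toList []).Nodup := pvScanA_nodup s.toList [] (by simp)
    have h2 : (pvRuns s.toList PySem.Set.empty).Nodup :=
      pvRuns_nodup s.toList PySem.Set.empty (by simp [PySem.Set.empty])
    have hmem : ∀ a, a ∈ pvScanA s.toList [] ↔ a ∈ pvRuns s.toList PySem.Set.empty := by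
      intro a
      rw [pvScanA_mem, pvRuns_mem]
      simp [PySem.Set.empty]
    exact ((List.perm_ext_iff_of_nodup h1 h2).2 hmem).length_eq
  rw [hperm]
  simp only [gt_iff_lt]
  by_cases h : 1 < (pvRuns s.toList PySem.Set.empty).length
  · rw [decide_eq_true h, Eq.comm, decide_eq_true_eq]; exact_mod_cast h
  · rw [decide_eq_false h, Eq.comm, decide_eq_false_iff_not]
    intro hc; exact h (by exact_mod_cast hc)
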